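-- pv_equiv track=rewrite | github.com/EldanGS/bversatile | Algorithms/Dynamic_programming/Simple_tasks/Diff_between_two_strings.py | diff_between_two_strings
-- ===== SOURCE A (Python) =====
-- def diff_between_two_strings(source, target):
--     n, m = len(source), len(target)
--     dp = [[0] * (m + 1) for _ in range(n + 1)]
--
--     for i in range(n + 1):
--         dp[i][0] = i
--     for j in range(m + 1):
--         dp[0][j] = j
--
--     for i in range(1, n + 1):
--         for j in range(1, m + 1):
--             if source[i - 1] == target[j - 1]:
--                 dp[i][j] = dp[i - 1][j - 1]
--             else:
--                 dp[i][j] = min(dp[i - 1][j], dp[i][j - 1]) + 1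
--
--     result = []
--     while n > 0 and m > 0:
--         if source[n - 1] == target[m - 1]:
--             result.append(source[n - 1])
--             n, m = n - 1, m - 1
--         else:
--             if dp[n][m] == dp[n][m - 1] + 1:  # add
--                 result.append("+" + target[m - 1])
--                 m -= 1
--             elif dp[n][m] == dp[n - 1][m] + 1:  # removing
--                 result.append("-" + source[n - 1])
--                 n -= 1
--
--     while n > 0:
--         result.append('-' + source[n - 1])
--         n -= 1
--
--     while m > 0:
--         result.append('+' + target[m - 1])
--         m -= 1
--
--     return result[::-1]
-- ===== SOURCE B (Python) =====
-- def diff_between_two_strings(source, target):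
--     memo = {}
--
--     def dist(i, j):
--         if (i, j) in memo:
--             return memo[(i, j)]
--         if i == 0:
--             r = j
--         elif j == 0:
--             r = i
--         elif source[i - 1] == target[j - 1]:
--             r = dist(i - 1, j - 1)
--         else:
--             r = min(dist(i - 1, j), dist(i, j - 1)) + 1
--         memo[(i, j)] = r
--         return r
--
--     def helper(i, j):
--         if i == 0:
--             return ['+' + c for c in target[:j]]
--         if j == 0:
--             return ['-' + c for c in source[:i]]
--         if source[i - 1] == target[j - 1]:
--             return helper(i - 1, j - 1) + [source[i - 1]]
--         if dist(i, j - 1) <= dist(i - 1, j):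
--             return helper(i, j - 1) + ['+' + target[j - 1]]
--         return helper(i - 1, j) + ['-' + source[i - 1]]
--
--     return helper(len(source), len(target))
-- ===== Notes on version B (the rewrite author's own statement) =====
-- stated objective: alternative
-- what changed: Replaces the bottom-up (n+1)x(m+1) distance table plus reverse backtrack-and-flip with a top-down memoized recursion: dist(i,j) computed on demand into a dict, and helper(i,j) builds the diff directly in forward order (insertion preferred on ties exactly as A).
import Mathlib
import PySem

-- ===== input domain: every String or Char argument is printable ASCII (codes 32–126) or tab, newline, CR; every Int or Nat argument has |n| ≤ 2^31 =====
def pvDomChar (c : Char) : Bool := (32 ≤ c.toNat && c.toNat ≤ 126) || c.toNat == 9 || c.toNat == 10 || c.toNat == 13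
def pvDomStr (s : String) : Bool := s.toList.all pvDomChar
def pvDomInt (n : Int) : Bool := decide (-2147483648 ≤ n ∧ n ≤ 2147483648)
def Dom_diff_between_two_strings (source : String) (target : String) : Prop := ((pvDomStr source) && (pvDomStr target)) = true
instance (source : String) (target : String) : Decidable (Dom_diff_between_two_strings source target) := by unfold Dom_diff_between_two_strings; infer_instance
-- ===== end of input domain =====

-- ===== PORT A =====
-- B replaces A's bottom-up table + backtrack with a top-down memoized recursion that
-- emits the diff in forward order (objective: alternative; same asymptotic cost).

-- dp[i][j] read/write on the list-of-lists table (indices are always in range where used)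
def pvGet2 (d : List (List Nat)) (i j : Nat) : Nat := (d.getD i []).getD j 0
def pvSet2 (d : List (List Nat)) (i j v : Nat) : List (List Nat) :=
  d.set i ((d.getD i []).set j v)

-- the three init loops and the nested fill loop of A (range(1, n+1) = List.range' 1 n)
def pvFill (cs ct : List Char) : List (List Nat) :=
  let n := cs.length
  let m := ct.length
  let dp0 := (List.range (n+1)).map (fun _ => List.replicate (m+1) (0 : Nat))
  let dp1 := (List.range (n+1)).foldl (fun d i => pvSet2 d i 0 i) dp0
  let dp2 := (List.range (m+1)).foldl (fun d j => pvSet2 d 0 j j) dp1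
  (List.range' 1 n).foldl (fun d i =>
    (List.range' 1 m).foldl (fun d j =>
      if cs.getD (i-1) ' ' = ct.getD (j-1) ' '
      then pvSet2 d i j (pvGet2 d (i-1) (j-1))
      else pvSet2 d i j (min (pvGet2 d (i-1) j) (pvGet2 d i (j-1)) + 1)) d) dp2

-- A's main 'while n > 0 and m > 0' loop; fuel = n+m bounds the iterations (each step
-- decreases n+m by at least 1).  The final 'else' is unreachable (proved below via the
-- table characterisation): there Python's while-loop would spin forever.
def pvMain (cs ct : List Char) (dp : List (List Nat)) :
    Nat → Nat → Nat → List String → Nat × Nat × List String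
  | 0, n, m, res => (n, m, res)
  | fuel+1, n, m, res =>
    if 0 < n ∧ 0 < m then
      if cs.getD (n-1) ' ' = ct.getD (m-1) ' ' then
        pvMain cs ct dp fuel (n-1) (m-1) (res ++ [String.ofList [cs.getD (n-1) ' ']])
      else if pvGet2 dp n m = pvGet2 dp n (m-1) + 1 then
        pvMain cs ct dp fuel n (m-1) (res ++ [String.ofList ['+', ct.getD (m-1) ' ']])
      else if pvGet2 dp n m = pvGet2 dp (n-1) m + 1 then
        pvMain cs ct dp fuel (n-1) m (res ++ [String.ofList ['-', cs.getD (n-1) ' ']])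
      else (n, m, res)
    else (n, m, res)

-- 'while n > 0: result.append('-' + source[n-1]); n -= 1'
def pvDels (cs : List Char) : Nat → List String → List String
  | 0, res => res
  | n+1, res => pvDels cs n (res ++ [String.ofList ['-', cs.getD n ' ']])

-- 'while m > 0: result.append('+' + target[m-1]); m -= 1'
def pvInss (ct : List Char) : Nat → List String → List String
  | 0, res => res
  | m+1, res => pvInss ct m (res ++ [String.ofList ['+', ct.getD m ' ']])

def diff_between_two_strings (source : String) (target : String) : List String :=
  let cs := source.toList
  let ct := target.toList
  let n := cs.length
  let m := ct.length
  let dp := pvFill cs ct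
  let r1 := pvMain cs ct dp (n+m) n m []
  let r2 := pvDels cs r1.1 r1.2.2
  let r3 := pvInss ct r1.2.1 r2
  r3.reverse      -- result[::-1]

-- ===== PORT B =====
-- memoized dist(i, j) of Source B, the memo dict threaded through
def pvDistB (cs ct : List Char) : Nat → Nat → PySem.Dict (Nat × Nat) Nat →
    Nat × PySem.Dict (Nat × Nat) Nat
  | i, j, memo =>
    match memo.get? (i, j) with
    | some v => (v, memo)
    | none =>
      let p : Nat × PySem.Dict (Nat × Nat) Nat :=
        if i = 0 then (j, memo)
        else if j = 0 then (i, memo)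
        else if cs.getD (i-1) ' ' = ct.getD (j-1) ' ' then pvDistB cs ct (i-1) (j-1) memo
        else
          let a := pvDistB cs ct (i-1) j memo
          let b := pvDistB cs ct i (j-1) a.2
          (min a.1 b.1 + 1, b.2)
      (p.1, p.2.insert (i, j) p.1)
  termination_by i j _ => i + j
  decreasing_by all_goals omega

-- helper(i, j) of Source B ('+'-prefixed target[:j] / '-'-prefixed source[:i] base cases)
def pvHelperB (cs ct : List Char) : Nat → Nat → PySem.Dict (Nat × Nat) Nat →
    List String × PySem.Dict (Nat × Nat) Nat
  | i, j, memo =>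
    if i = 0 then ((ct.take j).map (fun c => String.ofList ['+', c]), memo)
    else if j = 0 then ((cs.take i).map (fun c => String.ofList ['-', c]), memo)
    else if cs.getD (i-1) ' ' = ct.getD (j-1) ' ' then
      let r := pvHelperB cs ct (i-1) (j-1) memo
      (r.1 ++ [String.ofList [cs.getD (i-1) ' ']], r.2)
    else
      let a := pvDistB cs ct i (j-1) memo
      let b := pvDistB cs ct (i-1) j a.2
      if a.1 ≤ b.1 then
        let r := pvHelperB cs ct i (j-1) b.2
        (r.1 ++ [String.ofList ['+', ct.getD (j-1) ' ']], r.2)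
      else
        let r := pvHelperB cs ct (i-1) j b.2
        (r.1 ++ [String.ofList ['-', cs.getD (i-1) ' ']], r.2)
  termination_by i j _ => i + j
  decreasing_by all_goals omega

def diff_between_two_strings_alt (source : String) (target : String) : List String :=
  let cs := source.toList
  let ct := target.toList
  (pvHelperB cs ct cs.length ct.length PySem.Dict.empty).1

-- ===== PRECONDITION & SPEC =====
def Spec_diff_between_two_strings (source : String) (target : String) (out : List String) : Prop := out = diff_between_two_strings_alt source target
instance (source : String) (target : String) (out : List String) : Decidable (Spec_diff_between_two_strings source target out) := by unfold Spec_diff_between_two_strings; infer_instance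

-- ===== CLAIM (what is proved, stated in full; the proofs are below) =====
def Claim_equal_diff_between_two_strings : Prop := ∀ (source : String) (target : String), Dom_diff_between_two_strings source target → Spec_diff_between_two_strings source target (diff_between_two_strings source target)

-- ===== LEMMAS AND PROOFS =====

-- the pure edit-distance recurrence both programs compute
def pvD (cs ct : List Char) : Nat → Nat → Nat
  | i, j =>
    if i = 0 then j
    else if j = 0 then i
    else if cs.getD (i-1) ' ' = ct.getD (j-1) ' ' then pvD cs ct (i-1) (j-1)
    else min (pvD cs ct (i-1) j) (pvD cs ct i (j-1)) + 1
  termination_by i j => i + j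
  decreasing_by all_goals omega

-- the pure forward diff both programs compute
def pvDiffP (cs ct : List Char) : Nat → Nat → List String
  | i, j =>
    if i = 0 then (ct.take j).map (fun c => String.ofList ['+', c])
    else if j = 0 then (cs.take i).map (fun c => String.ofList ['-', c])
    else if cs.getD (i-1) ' ' = ct.getD (j-1) ' ' then
      pvDiffP cs ct (i-1) (j-1) ++ [String.ofList [cs.getD (i-1) ' ']]
    else if pvD cs ct i (j-1) ≤ pvD cs ct (i-1) j then
      pvDiffP cs ct i (j-1) ++ [String.ofList ['+', ct.getD (j-1) ' ']]
    else
      pvDiffP cs ct (i-1) j ++ [String.ofList ['-', cs.getD (i-1) ' ']]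
  termination_by i j => i + j
  decreasing_by all_goals omega

-- ---- B side ----

def pvMemoOK (cs ct : List Char) (memo : PySem.Dict (Nat × Nat) Nat) : Prop :=
  ∀ i j r, memo.get? (i, j) = some r → r = pvD cs ct i j

theorem pvMemoOK_insert (cs ct : List Char) (memo : PySem.Dict (Nat × Nat) Nat)
    (h : pvMemoOK cs ct memo) (i j : Nat) (v : Nat) (hv : v = pvD cs ct i j) :
    pvMemoOK cs ct (memo.insert (i, j) v) := by
  intro a b r hr
  by_cases hab : ((a : Nat), (b : Nat)) = (i, j)
  · rw [hab, PySem.Dict.get?_insert_self] at hr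
    cases hr
    cases hab
    exact hv
  · rw [PySem.Dict.get?_insert_of_ne memo v hab] at hr
    exact h a b r hr

theorem pvDistB_aux (cs ct : List Char) : ∀ (N i j : Nat), i + j ≤ N →
    ∀ memo : PySem.Dict (Nat × Nat) Nat, pvMemoOK cs ct memo →
    (pvDistB cs ct i j memo).1 = pvD cs ct i j ∧ pvMemoOK cs ct (pvDistB cs ct i j memo).2 := by
  intro N
  induction N with
  | zero =>
    intro i j hij memo h
    have hi : i = 0 := by omega
    have hj : j = 0 := by omega
    subst hi; subst hj
    rw [pvDistB]
    cases hget : memo.get? (0, 0) with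
    | some v =>
      simp only [hget]
      exact ⟨h 0 0 v hget, h⟩
    | none =>
      simp only [hget, if_pos rfl]
      refine ⟨by simp [pvD], pvMemoOK_insert cs ct memo h 0 0 _ (by simp [pvD])⟩
  | succ N ih =>
    intro i j hij memo h
    rw [pvDistB]
    cases hget : memo.get? (i, j) with
    | some v =>
      simp only [hget]
      exact ⟨h i j v hget, h⟩
    | none =>
      simp only [hget]
      by_cases hi : i = 0
      · subst hi
        simp only [if_pos rfl]
        exact ⟨by simp [pvD], pvMemoOK_insert cs ct memo h 0 j _ (by simp [pvD])⟩
      · by_cases hj : j = 0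
        · subst hj
          simp only [if_neg hi, if_pos rfl]
          exact ⟨by simp [pvD, hi], pvMemoOK_insert cs ct memo h i 0 _ (by simp [pvD, hi])⟩
        · by_cases hc : cs.getD (i-1) ' ' = ct.getD (j-1) ' '
          · simp only [if_neg hi, if_neg hj, if_pos hc]
            obtain ⟨h1, h2⟩ := ih (i-1) (j-1) (by omega) memo h
            have hD : pvD cs ct i j = pvD cs ct (i-1) (j-1) := by
              rw [pvD]; simp only [if_neg hi, if_neg hj, if_pos hc]
            exact ⟨by rw [h1, hD], pvMemoOK_insert cs ct _ h2 i j _ (by rw [h1, hD])⟩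
          · simp only [if_neg hi, if_neg hj, if_neg hc]
            obtain ⟨ha1, ha2⟩ := ih (i-1) j (by omega) memo h
            obtain ⟨hb1, hb2⟩ := ih i (j-1) (by omega) _ ha2
            have hD : pvD cs ct i j = min (pvD cs ct (i-1) j) (pvD cs ct i (j-1)) + 1 := by
              rw [pvD]; simp only [if_neg hi, if_neg hj, if_neg hc]
            refine ⟨by rw [ha1, hb1, hD], pvMemoOK_insert cs ct _ hb2 i j _ (by rw [ha1, hb1, hD])⟩

theorem pvDistB_correct (cs ct : List Char) (i j : Nat)
    (memo : PySem.Dict (Nat × Nat) Nat) (h : pvMemoOK cs ct memo) :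
    (pvDistB cs ct i j memo).1 = pvD cs ct i j ∧ pvMemoOK cs ct (pvDistB cs ct i j memo).2 :=
  pvDistB_aux cs ct (i + j) i j le_rfl memo h

theorem pvHelperB_aux (cs ct : List Char) : ∀ (N i j : Nat), i + j ≤ N →
    ∀ memo : PySem.Dict (Nat × Nat) Nat, pvMemoOK cs ct memo →
    (pvHelperB cs ct i j memo).1 = pvDiffP cs ct i j ∧
      pvMemoOK cs ct (pvHelperB cs ct i j memo).2 := by
  intro N
  induction N with
  | zero =>
    intro i j hij memo h
    have hi : i = 0 := by omega
    subst hi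
    rw [pvHelperB, pvDiffP]
    exact ⟨by simp, by simpa using h⟩
  | succ N ih =>
    intro i j hij memo h
    rw [pvHelperB, pvDiffP]
    by_cases hi : i = 0
    · exact ⟨by simp [hi], by simpa [hi] using h⟩
    · by_cases hj : j = 0
      · exact ⟨by simp [hi, hj], by simpa [hi, hj] using h⟩
      · by_cases hc : cs.getD (i-1) ' ' = ct.getD (j-1) ' '
        · simp only [if_neg hi, if_neg hj, if_pos hc]
          obtain ⟨h1, h2⟩ := ih (i-1) (j-1) (by omega) memo h
          exact ⟨by rw [h1], h2⟩
        · simp only [if_neg hi, if_neg hj, if_neg hc]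
          obtain ⟨ha1, ha2⟩ := pvDistB_correct cs ct i (j-1) memo h
          obtain ⟨hb1, hb2⟩ := pvDistB_correct cs ct (i-1) j _ ha2
          rw [ha1, hb1]
          by_cases hle : pvD cs ct i (j-1) ≤ pvD cs ct (i-1) j
          · simp only [if_pos hle]
            obtain ⟨h1, h2⟩ := ih i (j-1) (by omega) _ hb2
            exact ⟨by rw [h1], h2⟩
          · simp only [if_neg hle]
            obtain ⟨h1, h2⟩ := ih (i-1) j (by omega) _ hb2
            exact ⟨by rw [h1], h2⟩

theorem pvHelperB_correct (cs ct : List Char) (i j : Nat)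
    (memo : PySem.Dict (Nat × Nat) Nat) (h : pvMemoOK cs ct memo) :
    (pvHelperB cs ct i j memo).1 = pvDiffP cs ct i j ∧
      pvMemoOK cs ct (pvHelperB cs ct i j memo).2 :=
  pvHelperB_aux cs ct (i + j) i j le_rfl memo h

-- ---- A side: table characterisation ----

def pvShp (d : List (List Nat)) (n m : Nat) : Prop :=
  d.length = n+1 ∧ ∀ i < n+1, (d.getD i []).length = m+1

theorem pvGet2_set2_self (d : List (List Nat)) (i j v : Nat)
    (h1 : i < d.length) (h2 : j < (d.getD i []).length) :
    pvGet2 (pvSet2 d i j v) i j = v := by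
  have h2' : j < d[i].length := by rwa [List.getD_eq_getElem _ _ h1] at h2
  simp [pvGet2, pvSet2, List.getD_eq_getElem?_getD, h1, h2', List.getElem?_set]

theorem pvGet2_set2_ne (d : List (List Nat)) (a b i j v : Nat)
    (h : ¬ (a = i ∧ b = j)) :
    pvGet2 (pvSet2 d a b v) i j = pvGet2 d i j := by
  by_cases hai : a = i
  · subst hai
    have hb : b ≠ j := fun hb => h ⟨rfl, hb⟩
    by_cases hl : a < d.length
    · simp [pvGet2, pvSet2, List.getD_eq_getElem?_getD, hl, List.getElem?_set, hb]
    · simp [pvGet2, pvSet2, List.set_eq_of_length_le (Nat.le_of_not_lt hl)]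
  · simp [pvGet2, pvSet2, List.getD_eq_getElem?_getD, List.getElem?_set_ne, hai]

theorem pvShp_set2 (d : List (List Nat)) (n m a b v : Nat) (h : pvShp d n m) :
    pvShp (pvSet2 d a b v) n m := by
  obtain ⟨hl, hr⟩ := h
  refine ⟨by simp [pvSet2, hl], ?_⟩
  intro i hi
  by_cases hai : a = i
  · subst hai
    by_cases hal : a < d.length
    · simp only [pvSet2, List.getD_eq_getElem?_getD, List.getElem?_set_self hal]
      simpa [List.getD_eq_getElem?_getD] using hr a hi
    · exact absurd (hl ▸ hi) hal
  · simp only [pvSet2, List.getD_eq_getElem?_getD, List.getElem?_set_ne hai]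
    simpa [List.getD_eq_getElem?_getD] using hr i hi

-- invariant of the nested fill loop: cells on the border, in finished rows, or already
-- processed in the current row hold the recurrence value
def pvInv (cs ct : List Char) (d : List (List Nat)) (i jm : Nat) : Prop :=
  pvShp d cs.length ct.length ∧
    ∀ a b, a ≤ cs.length → b ≤ ct.length →
      (a = 0 ∨ b = 0 ∨ a < i ∨ (a = i ∧ b < jm)) → pvGet2 d a b = pvD cs ct a b

-- the four stages of pvFill, named for the proofs
def pvDp0 (cs ct : List Char) : List (List Nat) :=
  (List.range (cs.length+1)).map (fun _ => List.replicate (ct.length+1) (0 : Nat))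

def pvF1 (cs ct : List Char) (k : Nat) : List (List Nat) :=
  (List.range k).foldl (fun d i => pvSet2 d i 0 i) (pvDp0 cs ct)

def pvF2 (cs ct : List Char) (k : Nat) : List (List Nat) :=
  (List.range k).foldl (fun d j => pvSet2 d 0 j j) (pvF1 cs ct (cs.length+1))

def pvStep (cs ct : List Char) (i : Nat) (d : List (List Nat)) (j : Nat) : List (List Nat) :=
  if cs.getD (i-1) ' ' = ct.getD (j-1) ' '
  then pvSet2 d i j (pvGet2 d (i-1) (j-1))
  else pvSet2 d i j (min (pvGet2 d (i-1) j) (pvGet2 d i (j-1)) + 1)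

def pvF3 (cs ct : List Char) (k : Nat) : List (List Nat) :=
  (List.range' 1 k).foldl (fun d i => (List.range' 1 ct.length).foldl (pvStep cs ct i) d)
    (pvF2 cs ct (ct.length+1))

theorem pvFill_eq_pvF3 (cs ct : List Char) : pvFill cs ct = pvF3 cs ct cs.length := rfl

theorem pvDp0_eq (cs ct : List Char) :
    pvDp0 cs ct = List.replicate (cs.length+1) (List.replicate (ct.length+1) 0) := by
  simp [pvDp0]

theorem pvGet2_dp0 (cs ct : List Char) (i j : Nat) : pvGet2 (pvDp0 cs ct) i j = 0 := by
  rw [pvDp0_eq]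
  by_cases hi : i < cs.length + 1 <;>
    by_cases hj : j < ct.length + 1 <;>
      simp [pvGet2, List.getD_eq_getElem?_getD, hi, hj]

theorem pvShp_dp0 (cs ct : List Char) : pvShp (pvDp0 cs ct) cs.length ct.length := by
  rw [pvDp0_eq]
  refine ⟨by simp, ?_⟩
  intro i hi
  simp [List.getD_eq_getElem?_getD, hi]

theorem pvF1_get2 (cs ct : List Char) (k : Nat) (hk : k ≤ cs.length + 1) :
    pvShp (pvF1 cs ct k) cs.length ct.length ∧
      ∀ i j, pvGet2 (pvF1 cs ct k) i j = if i < k ∧ j = 0 then i else 0 := by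
  induction k with
  | zero => simpa [pvF1] using ⟨pvShp_dp0 cs ct, fun i j => pvGet2_dp0 cs ct i j⟩
  | succ k ih =>
    obtain ⟨hshp, hget⟩ := ih (by omega)
    have hstep : pvF1 cs ct (k+1) = pvSet2 (pvF1 cs ct k) k 0 k := by
      simp [pvF1, List.range_succ]
    refine ⟨hstep ▸ pvShp_set2 _ _ _ _ _ _ hshp, ?_⟩
    intro i j
    rw [hstep]
    by_cases hij : i = k ∧ j = 0
    · obtain ⟨rfl, rfl⟩ := hij
      rw [pvGet2_set2_self _ _ _ _ (by rw [hshp.1]; omega)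
        (by rw [hshp.2 i (by omega)]; omega)]
      simp
    · rw [pvGet2_set2_ne _ _ _ _ _ _ (by tauto), hget i j]
      split_ifs <;> omega

theorem pvF2_get2 (cs ct : List Char) (k : Nat) (hk : k ≤ ct.length + 1) :
    pvShp (pvF2 cs ct k) cs.length ct.length ∧
      ∀ i j, pvGet2 (pvF2 cs ct k) i j =
        if i = 0 ∧ j < k then j else if i < cs.length + 1 ∧ j = 0 then i else 0 := by
  induction k with
  | zero =>
    obtain ⟨hshp, hget⟩ := pvF1_get2 cs ct (cs.length+1) le_rfl
    exact ⟨hshp, by intro i j; simpa using hget i j⟩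
  | succ k ih =>
    obtain ⟨hshp, hget⟩ := ih (by omega)
    have hstep : pvF2 cs ct (k+1) = pvSet2 (pvF2 cs ct k) 0 k k := by
      simp [pvF2, List.range_succ]
    refine ⟨hstep ▸ pvShp_set2 _ _ _ _ _ _ hshp, ?_⟩
    intro i j
    rw [hstep]
    by_cases hij : i = 0 ∧ j = k
    · obtain ⟨rfl, rfl⟩ := hij
      rw [pvGet2_set2_self _ _ _ _ (by rw [hshp.1]; omega)
        (by rw [hshp.2 0 (by omega)]; omega)]
      simp
    · rw [pvGet2_set2_ne _ _ _ _ _ _ (by tauto), hget i j]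
      split_ifs <;> omega

theorem pvInv_step (cs ct : List Char) (d : List (List Nat)) (i j : Nat)
    (hi0 : 1 ≤ i) (hin : i ≤ cs.length) (hj0 : 1 ≤ j) (hjm : j ≤ ct.length)
    (h : pvInv cs ct d i j) : pvInv cs ct (pvStep cs ct i d j) i (j+1) := by
  obtain ⟨hshp, hval⟩ := h
  have hvnew : ∀ v, v = pvD cs ct i j → pvInv cs ct (pvSet2 d i j v) i (j+1) := by
    intro v hv
    refine ⟨pvShp_set2 _ _ _ _ _ _ hshp, ?_⟩
    intro a b ha hb hreg
    by_cases hab : a = i ∧ b = j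
    · obtain ⟨rfl, rfl⟩ := hab
      rw [pvGet2_set2_self _ _ _ _ (by rw [hshp.1]; omega)
        (by rw [hshp.2 _ (by omega)]; omega), hv]
    · rw [pvGet2_set2_ne _ _ _ _ _ _ (by tauto)]
      apply hval a b ha hb
      rcases hreg with h | h | h | h
      · exact Or.inl h
      · exact Or.inr (Or.inl h)
      · exact Or.inr (Or.inr (Or.inl h))
      · refine Or.inr (Or.inr (Or.inr ⟨h.1, ?_⟩))
        have : b ≠ j := fun hb' => hab ⟨h.1, hb'⟩
        omega
  rw [pvStep]
  by_cases hc : cs.getD (i-1) ' ' = ct.getD (j-1) ' '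
  · rw [if_pos hc]
    apply hvnew
    rw [hval (i-1) (j-1) (by omega) (by omega) (Or.inr (Or.inr (Or.inl (by omega))))]
    conv_rhs => rw [pvD]
    simp only [if_neg (by omega : ¬ i = 0), if_neg (by omega : ¬ j = 0), if_pos hc]
  · rw [if_neg hc]
    apply hvnew
    rw [hval (i-1) j (by omega) (by omega) (Or.inr (Or.inr (Or.inl (by omega)))),
        hval i (j-1) (by omega) (by omega) (Or.inr (Or.inr (Or.inr ⟨rfl, by omega⟩)))]
    conv_rhs => rw [pvD]
    simp only [if_neg (by omega : ¬ i = 0), if_neg (by omega : ¬ j = 0), if_neg hc]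

theorem pvInv_inner (cs ct : List Char) (d : List (List Nat)) (i : Nat)
    (hi0 : 1 ≤ i) (hin : i ≤ cs.length) :
    ∀ k, k ≤ ct.length → pvInv cs ct d i 1 →
      pvInv cs ct ((List.range' 1 k).foldl (pvStep cs ct i) d) i (k+1) := by
  intro k
  induction k with
  | zero => intro _ h; simpa using h
  | succ k ih =>
    intro hk h
    rw [List.range'_concat, List.foldl_append]
    simp only [Nat.one_mul, List.foldl_cons, List.foldl_nil]
    have hprev := ih (by omega) h
    have hstep := pvInv_step cs ct ((List.range' 1 k).foldl (pvStep cs ct i) d) i (1+k)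
      hi0 hin (by omega) (by omega)
      (by rw [show (1:Nat)+k = k+1 from by omega]; exact hprev)
    rw [show (1:Nat)+k+1 = k+1+1 from by omega] at hstep
    exact hstep

theorem pvInv_mono (cs ct : List Char) (d : List (List Nat)) (i : Nat)
    (h : pvInv cs ct d i (ct.length+1)) : pvInv cs ct d (i+1) 1 := by
  obtain ⟨hshp, hval⟩ := h
  refine ⟨hshp, ?_⟩
  intro a b ha hb hreg
  apply hval a b ha hb
  rcases hreg with h | h | h | h
  · exact Or.inl h
  · exact Or.inr (Or.inl h)
  · rcases Nat.lt_or_ge a i with h' | h'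
    · exact Or.inr (Or.inr (Or.inl h'))
    · exact Or.inr (Or.inr (Or.inr ⟨by omega, by omega⟩))
  · exact Or.inr (Or.inl (by omega))

theorem pvF3_inv (cs ct : List Char) : ∀ k, k ≤ cs.length →
    pvInv cs ct (pvF3 cs ct k) (k+1) 1 := by
  intro k
  induction k with
  | zero =>
    intro _
    rw [show pvF3 cs ct 0 = pvF2 cs ct (ct.length+1) from rfl]
    obtain ⟨hshp, hget⟩ := pvF2_get2 cs ct (ct.length+1) le_rfl
    refine ⟨hshp, ?_⟩
    intro a b ha hb hreg
    rw [hget a b]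
    rcases hreg with h | h | h | h
    · subst h
      rw [if_pos ⟨rfl, by omega⟩, pvD]
      simp
    · subst h
      by_cases ha0 : a = 0
      · subst ha0; rw [if_pos ⟨rfl, by omega⟩, pvD]; simp
      · rw [if_neg (by tauto), if_pos ⟨by omega, rfl⟩, pvD]
        simp [ha0]
    · have ha0 : a = 0 := by omega
      subst ha0
      rw [if_pos ⟨rfl, by omega⟩, pvD]
      simp
    · have hb0 : b = 0 := by omega
      subst hb0
      by_cases ha0 : a = 0
      · subst ha0; rw [if_pos ⟨rfl, by omega⟩, pvD]; simp
      · rw [if_neg (by tauto), if_pos ⟨by omega, rfl⟩, pvD]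
        simp [ha0]
  | succ k ih =>
    intro hk
    have hprev := ih (by omega)
    have hstep : pvF3 cs ct (k+1) =
        (List.range' 1 ct.length).foldl (pvStep cs ct (k+1)) (pvF3 cs ct k) := by
      rw [pvF3, List.range'_concat, List.foldl_append]
      simp only [Nat.one_mul, List.foldl_cons, List.foldl_nil]
      rw [show (1:Nat)+k = k+1 from by omega]
      rfl
    rw [hstep]
    apply pvInv_mono
    exact pvInv_inner cs ct _ (k+1) (by omega) (by omega) ct.length le_rfl hprev

theorem pvFill_correct (cs ct : List Char) (a b : Nat)
    (ha : a ≤ cs.length) (hb : b ≤ ct.length) :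
    pvGet2 (pvFill cs ct) a b = pvD cs ct a b := by
  rw [pvFill_eq_pvF3]
  obtain ⟨_, hval⟩ := pvF3_inv cs ct cs.length le_rfl
  exact hval a b ha hb (Or.inr (Or.inr (Or.inl (by omega))))

-- ---- A side: backtrack ----

theorem pvDels_eq (cs : List Char) (i : Nat) (res : List String) (h : i ≤ cs.length) :
    pvDels cs i res = res ++ ((cs.take i).map (fun c => String.ofList ['-', c])).reverse := by
  induction i generalizing res with
  | zero => simp [pvDels]
  | succ k ih =>
    have hk : k < cs.length := h
    rw [pvDels, ih _ (Nat.le_of_succ_le h)]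
    rw [List.take_add_one]
    simp only [List.getElem?_eq_getElem hk, List.getD_eq_getElem _ _ hk, Option.toList_some,
      List.map_append, List.map_cons, List.map_nil, List.reverse_append, List.reverse_cons,
      List.reverse_nil, List.nil_append, List.cons_append, List.append_assoc]

theorem pvInss_eq (ct : List Char) (j : Nat) (res : List String) (h : j ≤ ct.length) :
    pvInss ct j res = res ++ ((ct.take j).map (fun c => String.ofList ['+', c])).reverse := by
  induction j generalizing res with
  | zero => simp [pvInss]
  | succ k ih =>
    have hk : k < ct.length := h
    rw [pvInss, ih _ (Nat.le_of_succ_le h)]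
    rw [List.take_add_one]
    simp only [List.getElem?_eq_getElem hk, List.getD_eq_getElem _ _ hk, Option.toList_some,
      List.map_append, List.map_cons, List.map_nil, List.reverse_append, List.reverse_cons,
      List.reverse_nil, List.nil_append, List.cons_append, List.append_assoc]

theorem pvMain_eq (cs ct : List Char) (dp : List (List Nat))
    (hdp : ∀ a b, a ≤ cs.length → b ≤ ct.length → pvGet2 dp a b = pvD cs ct a b)
    (fuel : Nat) : ∀ (i j : Nat) (res : List String),
    i ≤ cs.length → j ≤ ct.length → i + j ≤ fuel →
    pvInss ct (pvMain cs ct dp fuel i j res).2.1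
        (pvDels cs (pvMain cs ct dp fuel i j res).1 (pvMain cs ct dp fuel i j res).2.2) =
      res ++ (pvDiffP cs ct i j).reverse := by
  induction fuel with
  | zero =>
    intro i j res hi hj hf
    have h1 : i = 0 := by omega
    have h2 : j = 0 := by omega
    subst h1; subst h2
    rw [pvMain]
    simp [pvDels, pvInss, pvDiffP]
  | succ fuel ih =>
    intro i j res hi hj hf
    rw [pvMain]
    by_cases hnm : 0 < i ∧ 0 < j
    · simp only [if_pos hnm]
      by_cases hc : cs.getD (i-1) ' ' = ct.getD (j-1) ' '
      · simp only [if_pos hc]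
        rw [ih (i-1) (j-1) _ (by omega) (by omega) (by omega)]
        conv_rhs => rw [pvDiffP]
        simp only [if_neg (by omega : ¬ i = 0), if_neg (by omega : ¬ j = 0), if_pos hc]
        simp
      · have e1 := hdp i j hi hj
        have e2 := hdp i (j-1) hi (by omega)
        have e3 := hdp (i-1) j (by omega) hj
        have hDij : pvD cs ct i j = min (pvD cs ct (i-1) j) (pvD cs ct i (j-1)) + 1 := by
          conv_lhs => rw [pvD]
          simp only [if_neg (by omega : ¬ i = 0), if_neg (by omega : ¬ j = 0), if_neg hc]
        simp only [if_neg hc, e1, e2, e3]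
        by_cases hle : pvD cs ct i (j-1) ≤ pvD cs ct (i-1) j
        · have hcond : pvD cs ct i j = pvD cs ct i (j-1) + 1 := by omega
          rw [if_pos hcond, ih i (j-1) _ hi (by omega) (by omega)]
          conv_rhs => rw [pvDiffP]
          simp only [if_neg (by omega : ¬ i = 0), if_neg (by omega : ¬ j = 0), if_neg hc,
            if_pos hle]
          simp
        · have hcond1 : ¬ (pvD cs ct i j = pvD cs ct i (j-1) + 1) := by omega
          have hcond2 : pvD cs ct i j = pvD cs ct (i-1) j + 1 := by omega
          rw [if_neg hcond1, if_pos hcond2, ih (i-1) j _ (by omega) hj (by omega)]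
          conv_rhs => rw [pvDiffP]
          simp only [if_neg (by omega : ¬ i = 0), if_neg (by omega : ¬ j = 0), if_neg hc,
            if_neg hle]
          simp
    · simp only [if_neg hnm]
      by_cases hi0 : i = 0
      · subst hi0
        conv_rhs => rw [pvDiffP]
        simp only [if_pos rfl]
        simpa [pvDels] using pvInss_eq ct j res hj
      · have hj0 : j = 0 := by omega
        subst hj0
        conv_rhs => rw [pvDiffP]
        simp only [if_neg hi0, if_pos rfl]
        simpa [pvInss] using pvDels_eq cs i res hi

-- ===== VERDICT (by name: the statement is the Claim_ definition above) =====
theorem diff_between_two_strings_spec : Claim_equal_diff_between_two_strings := by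
  intro source target _
  show diff_between_two_strings source target = diff_between_two_strings_alt source target
  have hA := pvMain_eq source.toList target.toList (pvFill source.toList target.toList)
    (fun a b ha hb => pvFill_correct source.toList target.toList a b ha hb)
    (source.toList.length + target.toList.length) source.toList.length target.toList.length []
    le_rfl le_rfl le_rfl
  have hB := pvHelperB_correct source.toList target.toList
    source.toList.length target.toList.length PySem.Dict.empty
    (by intro i j r hr; simp [PySem.Dict.get?_empty] at hr)
  simp only [diff_between_two_strings, diff_between_two_strings_alt]
  rw [hB.1, hA]
  simp
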